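-- pv_equiv track=rewrite | github.com/dl0312/PS | naver_hackday/03.py | solution
-- ===== SOURCE A (Python) =====
-- from collections import Counter
--
-- def solution(t_lst):
--     t_lst_sorted = sorted(t_lst, reverse = True)
--     winter_max_t = t_lst[0]
--     winter_max_t_idx = 0
--     for idx, t in enumerate(t_lst):
--         if t >= winter_max_t:
--             winter_max_t_idx = t_lst_sorted.index(t)
--         if Counter(t_lst_sorted[winter_max_t_idx:]) == Counter(t_lst[:idx+1]):
--             return idx+1
-- ===== SOURCE B (Python) =====
-- def solution(t_lst):
--     asc = sorted(t_lst)
--     # le[v] = number of elements <= v (last position of v in asc, 1-based)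
--     le = {}
--     for i, v in enumerate(asc):
--         le[v] = i + 1
--     # suffmin[i] = min of t_lst[i:], None for the empty suffix
--     n = len(t_lst)
--     suffmin = [None] * (n + 1)
--     for i in range(n - 1, -1, -1):
--         nxt = suffmin[i + 1]
--         suffmin[i] = t_lst[i] if nxt is None or t_lst[i] < nxt else nxt
--     target = 0
--     runmax = None
--     for idx, t in enumerate(t_lst):
--         runmax = t if runmax is None or t > runmax else runmax
--         if t >= t_lst[0]:
--             target = le[t]
--         nxt = suffmin[idx + 1]
--         if idx + 1 == target and (nxt is None or runmax <= nxt):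
--             return idx + 1
--     return None
-- ===== Notes on version B (the rewrite author's own statement) =====
-- stated objective: faster
-- what changed: Instead of rebuilding and comparing two Counters at every index (O(n) per step), B precomputes a value->rank dict over the sorted list and a suffix-minimum array and keeps a running prefix maximum, so each loop step is an O(1) check (prefix length equals the rank of the last element >= t_lst[0], and prefix max <= suffix min).
import Mathlib
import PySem

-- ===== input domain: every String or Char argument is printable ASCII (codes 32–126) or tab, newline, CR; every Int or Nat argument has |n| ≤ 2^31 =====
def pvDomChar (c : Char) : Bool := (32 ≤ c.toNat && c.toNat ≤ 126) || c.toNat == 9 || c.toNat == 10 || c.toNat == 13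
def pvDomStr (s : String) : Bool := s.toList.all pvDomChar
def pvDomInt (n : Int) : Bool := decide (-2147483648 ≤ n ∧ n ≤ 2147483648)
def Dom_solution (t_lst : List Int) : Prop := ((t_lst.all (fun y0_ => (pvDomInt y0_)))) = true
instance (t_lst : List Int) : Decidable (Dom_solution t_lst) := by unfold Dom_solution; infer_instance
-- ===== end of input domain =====

-- B replaces A's per-index Counter rebuild-and-compare with a rank dict, a suffix-minimum
-- array and a running prefix maximum (O(n log n) instead of O(n^2)); return values agree on
-- every non-empty list (A raises IndexError on []).

-- ===== PORT A =====
-- Python's `==` on two dicts ignores insertion order: same key set, same value at each key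
-- (the getD default 0 is never consulted: it is guarded by `contains`).
def pvDictEq (d1 d2 : PySem.Dict Int Int) : Bool :=
  d1.keys.all (fun k => d2.contains k) && d2.keys.all (fun k => d1.contains k) &&
  d1.keys.all (fun k => d1.getD k 0 == d2.getD k 0)

-- the `for idx, t in enumerate(t_lst)` loop; state = winter_max_t_idx.
-- `.index(t)` never raises here (t is drawn from t_lst), hence the `.getD 0`.
def pvLoopA (t_lst t_lst_sorted : List Int) (wmax : Int) :
    List (Int × Int) → Nat → Option Int
  | [], _ => none
  | (idx, t) :: rest, k0 =>
    let k := if wmax ≤ t then (PySem.List.index? t_lst_sorted t).getD 0 else k0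
    if pvDictEq (PySem.Dict.counter (PySem.List.slice t_lst_sorted (some (k : Int)) none))
                (PySem.Dict.counter (PySem.List.slice t_lst none (some (idx + 1))))
    then some (idx + 1)
    else pvLoopA t_lst t_lst_sorted wmax rest k

def solution (t_lst : List Int) : Option Int :=
  match PySem.List.pyGet? t_lst 0 with
  | none => none     -- t_lst[0] raises IndexError in Python: excluded by Pre_solution
  | some wmax =>
    pvLoopA t_lst (PySem.List.sorted t_lst (fun x => x) true) wmax
      (PySem.List.enumerate t_lst 0) 0

-- ===== PORT B =====
-- `le = {}; for i, v in enumerate(asc): le[v] = i + 1`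
def pvBuildLe (asc : List Int) : PySem.Dict Int Int :=
  (PySem.List.enumerate asc 0).foldl (fun d p => d.insert p.2 (p.1 + 1)) PySem.Dict.empty

-- the backwards fill `suffmin[i] = t_lst[i] if nxt is None or t_lst[i] < nxt else nxt`,
-- cell i computed from cell i+1; result has length n+1, last cell None.
def pvSuffMins : List Int → List (Option Int)
  | [] => [none]
  | x :: rest =>
    let acc := pvSuffMins rest
    (match acc.headD none with
     | none => some x
     | some m => some (if x < m then x else m)) :: acc

-- the `for idx, t in enumerate(t_lst)` loop; state = (target, runmax).
-- `le[t]` never raises (t is drawn from t_lst ⊇ keys of le), hence getD 0.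
def pvLoopB (first : Int) (le : PySem.Dict Int Int) (suffmin : List (Option Int)) :
    List (Int × Int) → Int → Option Int → Option Int
  | [], _, _ => none
  | (idx, t) :: rest, target0, runmax0 =>
    let runmax : Int := match runmax0 with
      | none => t
      | some r => if r < t then t else r
    let target := if first ≤ t then le.getD t 0 else target0
    if (idx + 1 == target) &&
       (match (PySem.List.pyGet? suffmin (idx + 1)).getD none with
        | none => true
        | some m => decide (runmax ≤ m))
    then some (idx + 1)
    else pvLoopB first le suffmin rest target (some runmax)

def solution_alt (t_lst : List Int) : Option Int :=
  match t_lst with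
  | [] => none       -- the loop body never runs; Python B returns None
  | t0 :: _ =>
    pvLoopB t0 (pvBuildLe (PySem.List.sorted t_lst (fun x => x) false)) (pvSuffMins t_lst)
      (PySem.List.enumerate t_lst 0) 0 none

-- ===== PRECONDITION & SPEC =====
-- Pre_ excludes exactly the empty list, on which A raises IndexError (t_lst[0]).
def Pre_solution (t_lst : List Int) : Prop := t_lst ≠ []
instance (t_lst : List Int) : Decidable (Pre_solution t_lst) := by unfold Pre_solution; infer_instance
def pvWitness_solution : List Int := [2, 1, 1]

def Spec_solution (t_lst : List Int) (out : Option Int) : Prop := out = solution_alt t_lst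
instance (t_lst : List Int) (out : Option Int) : Decidable (Spec_solution t_lst out) := by unfold Spec_solution; infer_instance

-- ===== CLAIM (what is proved, stated in full; the proofs are below) =====
def Claim_equal_solution : Prop := ∀ (t_lst : List Int), Dom_solution t_lst → Pre_solution t_lst → Spec_solution t_lst (solution t_lst)

-- ===== LEMMAS AND PROOFS =====

-- closed forms for the loop states over the prefix `pre` of the input
-- (init `first` is overwritten at index 0, where t = first):
def pvLg (first : Int) (pre : List Int) : Int :=
  pre.foldl (fun a t => if first ≤ t then t else a) first
def pvRm (first : Int) (pre : List Int) : Int :=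
  pre.foldl (fun a t => if a < t then t else a) first

lemma pvLg_mem (first : Int) (l : List Int) : ∀ a : Int,
    l.foldl (fun a t => if first ≤ t then t else a) a ∈ a :: l := by
  induction l with
  | nil => intro a; simp [List.foldl]
  | cons x l ih =>
    intro a
    simp only [List.foldl_cons]
    rcases List.mem_cons.mp (ih (if first ≤ x then x else a)) with h | h
    · rw [h]; split_ifs <;> simp
    · simp [h]

lemma pvRm_eq_foldl_max (l : List Int) (a : Int) :
    l.foldl (fun a t => if a < t then t else a) a = l.foldl max a := by
  congr 1
  funext b t
  rcases lt_or_ge b t with h | h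
  · simp [h, max_eq_right h.le]
  · simp [not_lt.mpr h, max_eq_left h]

lemma pvRm_mem (first : Int) (l : List Int) : pvRm first l ∈ first :: l := by
  unfold pvRm
  rw [pvRm_eq_foldl_max]
  rcases PySem.List.foldl_max_mem l first with h | h
  · simp [h]
  · simp [h]

lemma pvRm_isMax (first : Int) (l : List Int) : ∀ x ∈ first :: l, x ≤ pvRm first l := by
  unfold pvRm
  rw [pvRm_eq_foldl_max]
  intro x hx
  rcases List.mem_cons.mp hx with h | h
  · rw [h]; exact (PySem.List.le_foldl_max l first).1
  · exact (PySem.List.le_foldl_max l first).2 x h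

-- 1. dict equality of two counters is pointwise count equality
lemma pvDictEq_counter_iff (xs ys : List Int) :
    pvDictEq (PySem.Dict.counter xs) (PySem.Dict.counter ys) = true ↔
      ∀ v : Int, xs.count v = ys.count v := by
  simp only [pvDictEq, Bool.and_eq_true, List.all_eq_true, PySem.Dict.keys_counter,
    PySem.Set.mem_ofList, PySem.Dict.contains_counter, PySem.Dict.getD_counter,
    List.contains_iff_mem, beq_iff_eq]
  constructor
  · rintro ⟨⟨h1, h2⟩, h3⟩ v
    by_cases hx : v ∈ xs
    · exact_mod_cast h3 v hx
    · by_cases hy : v ∈ ys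
      · exact absurd (h2 v hy) hx
      · rw [List.count_eq_zero.mpr hx, List.count_eq_zero.mpr hy]
  · intro h
    refine ⟨⟨fun v hv => ?_, fun v hv => ?_⟩, fun v _ => ?_⟩
    · have := h v
      rw [← List.count_pos_iff] at hv ⊢
      omega
    · have := h v
      rw [← List.count_pos_iff] at hv ⊢
      omega
    · exact_mod_cast h v

-- 2. descending sort is the reverse of the ascending sort
lemma pvDesc_eq_reverse (xs : List Int) :
    PySem.List.sorted xs (fun x => x) true =
      (PySem.List.sorted xs (fun x => x) false).reverse := by
  have h : (PySem.List.sorted xs (fun x => x) true).reverse =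
      PySem.List.sorted xs (fun x => x) false := by
    apply PySem.List.eq_of_perm_of_pairwise_le_of_injective (fun x : Int => x)
      (fun a b hab => hab)
    · exact ((PySem.List.sorted xs (fun x => x) true).reverse_perm.trans
        (PySem.List.sorted_perm xs (fun x => x) true)).trans
        (PySem.List.sorted_perm xs (fun x => x) false).symm
    · rw [List.pairwise_reverse]
      exact PySem.List.sorted_pairwise_rev xs (fun x => x)
    · exact PySem.List.sorted_pairwise xs (fun x => x)
  rw [← h, List.reverse_reverse]

-- 3. first index of t in a descending-sorted list = number of elements > t
lemma pvIndex?_sorted_ge (l : List Int) (hl : l.Pairwise (fun a b => b ≤ a)) (t : Int)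
    (ht : t ∈ l) : PySem.List.index? l t = some (l.countP (fun x => decide (t < x))) := by
  induction l with
  | nil => cases ht
  | cons a l ih =>
    rcases List.pairwise_cons.mp hl with ⟨ha, hl'⟩
    by_cases hat : a = t
    · subst hat
      rw [PySem.List.index?_cons_self]
      have h0 : (a :: l).countP (fun x => decide (a < x)) = 0 := by
        rw [List.countP_eq_zero]
        intro x hx
        rcases List.mem_cons.mp hx with h | h
        · simp [h]
        · simpa using not_lt.mpr (ha x h)
      rw [h0]
    · have ht' : t ∈ l := by
        rcases List.mem_cons.mp ht with h | h
        · exact absurd h.symm hat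
        · exact h
      rw [PySem.List.index?_cons_of_ne l (fun h => hat h), ih hl' ht']
      have hta : t < a := lt_of_le_of_ne (ha t ht') (fun h => hat h.symm)
      simp [hta]

-- 4. the rank dict on an ascending-sorted list: le[v] = #{x | x ≤ v}
lemma pvBuildLe_getD (l : List Int) (hl : l.Pairwise (fun a b => a ≤ b)) (v : Int)
    (hv : v ∈ l) : (pvBuildLe l).getD v 0 = (l.countP (fun x => decide (x ≤ v)) : Int) := by
  induction l using List.reverseRecOn with
  | nil => cases hv
  | append_singleton ws a ih =>
    have hsplit := List.pairwise_append.mp hl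
    have hws : ws.Pairwise (fun a b => a ≤ b) := hsplit.1
    have hwa : ∀ x ∈ ws, x ≤ a := fun x hx => hsplit.2.2 x hx a (List.mem_singleton_self a)
    have hexp : pvBuildLe (ws ++ [a]) = (pvBuildLe ws).insert a ((ws.length : Int) + 1) := by
      unfold pvBuildLe
      rw [PySem.List.enumerate_append, List.foldl_append]
      simp [PySem.List.enumerate_cons, PySem.List.enumerate_nil]
    rw [hexp, PySem.Dict.getD_insert]
    by_cases hva : v = a
    · subst hva
      rw [if_pos rfl, List.countP_append]
      have h1 : ws.countP (fun x => decide (x ≤ v)) = ws.length :=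
        List.countP_eq_length.mpr (fun x hx => by simpa using hwa x hx)
      have h2 : [v].countP (fun x => decide (x ≤ v)) = 1 := by simp
      rw [h1, h2]; push_cast; ring
    · have hv' : v ∈ ws := by
        rcases List.mem_append.mp hv with h | h
        · exact h
        · exact absurd (List.mem_singleton.mp h) hva
      have hna : ¬ (a ≤ v) := fun h => hva (le_antisymm (hwa v hv') h)
      rw [if_neg hva, List.countP_append, ih hws hv']
      simp [hna]

lemma pvSuffMins_headD (xs : List Int) :
    (pvSuffMins xs).headD none =
      match xs with
      | [] => none
      | y :: ys => some (ys.foldl min y) := by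
  induction xs with
  | nil => rfl
  | cons x rest ih =>
    show (match (pvSuffMins rest).headD none with
      | none => some x
      | some m => some (if x < m then x else m)) = _
    rw [ih]
    cases rest with
    | nil => rfl
    | cons r rs =>
      show some (if x < rs.foldl min r then x else rs.foldl min r) = some ((r :: rs).foldl min x)
      have h1 : (if x < rs.foldl min r then x else rs.foldl min r) = min x (rs.foldl min r) := by
        rcases lt_or_ge x (rs.foldl min r) with h | h
        · simp [h, min_eq_left h.le]
        · simp [not_lt.mpr h, min_eq_right h]
      rw [h1, List.foldl_cons]
      exact congrArg some (List.foldl_assoc).symm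

-- 5. cell j of the suffix-minimum array is the minimum of the suffix
lemma pvSuffMins_getD (xs : List Int) (j : Nat) :
    (pvSuffMins xs).getD j none =
      match xs.drop j with
      | [] => none
      | y :: ys => some (ys.foldl min y) := by
  induction xs generalizing j with
  | nil => cases j <;> rfl
  | cons x rest ih =>
    cases j with
    | zero =>
      have : (pvSuffMins (x :: rest)).getD 0 none = (pvSuffMins (x :: rest)).headD none := by
        show (_ :: pvSuffMins rest).getD 0 none = (_ :: pvSuffMins rest).headD none
        rfl
      rw [this, pvSuffMins_headD, List.drop_zero]
    | succ j =>
      show (pvSuffMins rest).getD j none = _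
      rw [ih j, List.drop_succ_cons]

lemma pvSuffMins_length (xs : List Int) : (pvSuffMins xs).length = xs.length + 1 := by
  induction xs with
  | nil => rfl
  | cons x rest ih => show (pvSuffMins rest).length + 1 = _; rw [ih]; rfl

-- 6. a prefix is a permutation of the m smallest elements iff m is the prefix length
--    and every prefix element is ≤ every suffix element
lemma pvPerm_take_iff (xs : List Int) (m i : Nat) (hm : m ≤ xs.length) (hi : i < xs.length) :
    ((PySem.List.sorted xs (fun x => x) false).take m).Perm (xs.take (i + 1)) ↔
      (m = i + 1 ∧ ∀ p ∈ xs.take (i + 1), ∀ s ∈ xs.drop (i + 1), p ≤ s) := by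
  set asc := PySem.List.sorted xs (fun x => x) false with hasc
  have hlen : asc.length = xs.length := PySem.List.length_sorted xs (fun x => x) false
  have hpasc : asc.Pairwise (fun a b => a ≤ b) := PySem.List.sorted_pairwise xs (fun x => x)
  constructor
  · intro h
    have hml : m = i + 1 := by
      have h1 : (asc.take m).length = m := by rw [List.length_take]; omega
      have h2 : (xs.take (i + 1)).length = i + 1 := by rw [List.length_take]; omega
      rw [← h1, h.length_eq, h2]
    subst hml
    refine ⟨rfl, fun p hp s hs => ?_⟩
    have hdropperm : (xs.drop (i + 1)).Perm (asc.drop (i + 1)) := by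
      have hx : (xs.take (i + 1) ++ xs.drop (i + 1)).Perm (xs.take (i + 1) ++ asc.drop (i + 1)) := by
        have h1 : (xs.take (i + 1) ++ xs.drop (i + 1)).Perm asc := by
          rw [List.take_append_drop]
          exact (PySem.List.sorted_perm xs (fun x => x) false).symm
        have h2 : asc.Perm (xs.take (i + 1) ++ asc.drop (i + 1)) := by
          conv_lhs => rw [← List.take_append_drop (i + 1) asc]
          exact h.append_right _
        exact h1.trans h2
      exact (List.perm_append_left_iff _).mp hx
    have hp' : p ∈ asc.take (i + 1) := h.mem_iff.mpr hp
    have hs' : s ∈ asc.drop (i + 1) := hdropperm.mem_iff.mp hs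
    have := List.pairwise_append.mp (by rw [List.take_append_drop (i + 1) asc]; exact hpasc)
    exact this.2.2 p hp' s hs'
  · rintro ⟨hml, hcross⟩
    subst hml
    set P := xs.take (i + 1) with hP
    set S := xs.drop (i + 1) with hS
    set A1 := PySem.List.sorted P (fun x => x) false with hA1
    set A2 := PySem.List.sorted S (fun x => x) false with hA2
    have hasc_eq : asc = A1 ++ A2 := by
      apply PySem.List.eq_of_perm_of_pairwise_le_of_injective (fun x : Int => x)
        (fun a b hab => hab)
      · have h1 : asc.Perm (P ++ S) := by
          rw [hP, hS, List.take_append_drop]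
          exact PySem.List.sorted_perm xs (fun x => x) false
        exact h1.trans ((PySem.List.sorted_perm P (fun x => x) false).symm.append
          (PySem.List.sorted_perm S (fun x => x) false).symm)
      · exact hpasc
      · rw [List.pairwise_append]
        refine ⟨PySem.List.sorted_pairwise P (fun x => x),
          PySem.List.sorted_pairwise S (fun x => x), fun p hp s hs => ?_⟩
        exact hcross p ((PySem.List.mem_sorted P (fun x => x) false p).mp hp)
          s ((PySem.List.mem_sorted S (fun x => x) false s).mp hs)
    have hA1len : A1.length = i + 1 := by
      rw [hA1, PySem.List.length_sorted, hP, List.length_take]; omega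
    rw [hasc_eq, List.take_left' hA1len]
    exact PySem.List.sorted_perm P (fun x => x) false

-- 7. per-step condition equality at index j (with the states already updated)
lemma pvCond_eq (t0 : Int) (tl : List Int) (j : Nat) (hj : j < (t0 :: tl).length) :
    (pvDictEq
        (PySem.Dict.counter (PySem.List.slice (PySem.List.sorted (t0 :: tl) (fun x => x) true)
          (some (((PySem.List.index? (PySem.List.sorted (t0 :: tl) (fun x => x) true)
            (pvLg t0 ((t0 :: tl).take (j + 1)))).getD 0 : Nat) : Int)) none))
        (PySem.Dict.counter (PySem.List.slice (t0 :: tl) none (some ((j : Int) + 1)))))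
      = (((j : Int) + 1 == (pvBuildLe (PySem.List.sorted (t0 :: tl) (fun x => x) false)).getD
            (pvLg t0 ((t0 :: tl).take (j + 1))) 0) &&
         (match (PySem.List.pyGet? (pvSuffMins (t0 :: tl)) ((j : Int) + 1)).getD none with
          | none => true
          | some m => decide (pvRm t0 ((t0 :: tl).take (j + 1)) ≤ m))) := by
  have hj' : j < (t0 :: tl).length := hj
  set L := t0 :: tl with hL
  set lg := pvLg t0 (L.take (j + 1)) with hlg
  set asc := PySem.List.sorted L (fun x => x) false with hasc
  have hdesc : PySem.List.sorted L (fun x => x) true = asc.reverse := pvDesc_eq_reverse L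
  have hlenasc : asc.length = L.length := PySem.List.length_sorted L (fun x => x) false
  have htake : L.take (j + 1) = t0 :: tl.take j := List.take_succ_cons
  have hlg_mem : lg ∈ L.take (j + 1) := by
    rw [hlg, htake]
    unfold pvLg
    rw [List.foldl_cons]
    have h0 : (if t0 ≤ t0 then t0 else t0) = t0 := by simp
    rw [h0]
    exact pvLg_mem t0 (tl.take j) t0
  have hlg_L : lg ∈ L := List.mem_of_mem_take hlg_mem
  have hlg_desc : lg ∈ asc.reverse := by
    rw [List.mem_reverse, hasc]
    exact (PySem.List.mem_sorted L (fun x => x) false lg).mpr hlg_L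
  have hdesc_pair : (asc.reverse).Pairwise (fun a b => b ≤ a) := by
    rw [← hdesc]
    exact PySem.List.sorted_pairwise_rev L (fun x => x)
  set kc := (asc.reverse).countP (fun x => decide (lg < x)) with hkc
  have hidx : PySem.List.index? (asc.reverse) lg = some kc :=
    pvIndex?_sorted_ge _ hdesc_pair lg hlg_desc
  have hkcL : kc = L.countP (fun x => decide (lg < x)) := by
    rw [hkc]
    exact List.Perm.countP_congr
      ((asc.reverse_perm).trans (PySem.List.sorted_perm L (fun x => x) false))
      (fun x _ => rfl)
  set cLE := L.countP (fun x => decide (x ≤ lg)) with hcLE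
  have hsum : cLE + kc = L.length := by
    rw [hcLE, hkcL]
    have h1 := List.length_eq_countP_add_countP (p := fun x => decide (x ≤ lg)) (l := L)
    have h2 : L.countP (fun a => decide (¬ decide (a ≤ lg) = true)) =
        L.countP (fun x => decide (lg < x)) :=
      List.countP_congr (fun x _ => by simp [not_le])
    omega
  have hgetD : (pvBuildLe asc).getD lg 0 = (cLE : Int) := by
    rw [pvBuildLe_getD asc (PySem.List.sorted_pairwise L (fun x => x)) lg
      ((PySem.List.mem_sorted L (fun x => x) false lg).mpr hlg_L), hcLE]
    congr 1
    exact List.Perm.countP_congr (PySem.List.sorted_perm L (fun x => x) false) (fun x _ => rfl)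
  have hcast : (j : Int) + 1 = ((j + 1 : Nat) : Int) := by push_cast; ring
  have hsm : (PySem.List.pyGet? (pvSuffMins L) (((j + 1 : Nat) : Int))).getD none =
      (match L.drop (j + 1) with
       | [] => none
       | y :: ys => some (ys.foldl min y)) := by
    have hlt : j + 1 < (pvSuffMins L).length := by
      rw [pvSuffMins_length]
      omega
    rw [PySem.List.pyGet?_ofNat _ _ hlt, Option.getD_some,
      ← List.getD_eq_getElem _ none hlt, pvSuffMins_getD]
  have hrm_mem : pvRm t0 (L.take (j + 1)) ∈ L.take (j + 1) := by
    rw [htake]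
    unfold pvRm
    rw [List.foldl_cons]
    have h0 : (if t0 < t0 then t0 else t0) = t0 := by simp
    rw [h0]
    exact pvRm_mem t0 (tl.take j)
  have hrm_max : ∀ x ∈ L.take (j + 1), x ≤ pvRm t0 (L.take (j + 1)) := by
    rw [htake]
    unfold pvRm
    rw [List.foldl_cons]
    have h0 : (if t0 < t0 then t0 else t0) = t0 := by simp
    rw [h0]
    exact pvRm_isMax t0 (tl.take j)
  rw [hdesc, hidx, Option.getD_some, PySem.List.slice_from_natCast, hcast,
    PySem.List.slice_to_natCast, List.drop_reverse, hlenasc, Bool.eq_iff_iff,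
    pvDictEq_counter_iff, ← List.perm_iff_count]
  have hperm_rev : ((asc.take (L.length - kc)).reverse).Perm (L.take (j + 1)) ↔
      (asc.take (L.length - kc)).Perm (L.take (j + 1)) :=
    ⟨fun h => ((asc.take (L.length - kc)).reverse_perm).symm.trans h,
     fun h => ((asc.take (L.length - kc)).reverse_perm).trans h⟩
  rw [hperm_rev, hasc, pvPerm_take_iff L (L.length - kc) j (Nat.sub_le _ _) hj', ← hasc]
  rw [hgetD, hsm]
  have hkle : kc ≤ L.length := by omega
  cases hdd : L.drop (j + 1) with
  | nil =>
    simp only [Bool.and_eq_true, beq_iff_eq, List.not_mem_nil, false_implies, implies_true,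
      and_true]
    constructor
    · intro h
      omega
    · intro h
      omega
  | cons y ys =>
    simp only [Bool.and_eq_true, beq_iff_eq, decide_eq_true_eq]
    constructor
    · rintro ⟨hA, hcross⟩
      refine ⟨by omega, ?_⟩
      have hm0 : ys.foldl min y ∈ y :: ys := by
        rcases PySem.List.foldl_min_mem ys y with h | h
        · rw [h]; exact List.mem_cons_self
        · exact List.mem_cons_of_mem y h
      exact hcross (pvRm t0 (L.take (j + 1))) hrm_mem (ys.foldl min y) (hdd ▸ hm0)
    · rintro ⟨hB, hrmle⟩
      refine ⟨by omega, ?_⟩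
      intro p hp s hs
      have hps : p ≤ pvRm t0 (L.take (j + 1)) := hrm_max p hp
      have hm0s : ys.foldl min y ≤ s := by
        rcases List.mem_cons.mp hs with h | h
        · rw [h]; exact (PySem.List.foldl_min_le ys y).1
        · exact (PySem.List.foldl_min_le ys y).2 s h
      omega

-- 8. the two loops agree from any position j ≥ 1 onwards, given the state closed forms
lemma pvLoop_eq (t0 : Int) (tl : List Int) :
    ∀ (u : List Int) (j : Nat), 1 ≤ j → (t0 :: tl).drop j = u →
    pvLoopA (t0 :: tl) (PySem.List.sorted (t0 :: tl) (fun x => x) true) t0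
        (PySem.List.enumerate u j)
        ((PySem.List.index? (PySem.List.sorted (t0 :: tl) (fun x => x) true)
          (pvLg t0 ((t0 :: tl).take j))).getD 0) =
      pvLoopB t0 (pvBuildLe (PySem.List.sorted (t0 :: tl) (fun x => x) false))
        (pvSuffMins (t0 :: tl)) (PySem.List.enumerate u j)
        ((pvBuildLe (PySem.List.sorted (t0 :: tl) (fun x => x) false)).getD
          (pvLg t0 ((t0 :: tl).take j)) 0)
        (some (pvRm t0 ((t0 :: tl).take j))) := by
  intro u
  induction u with
  | nil =>
    intro j h1 hdrop
    simp [PySem.List.enumerate_nil, pvLoopA, pvLoopB]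
  | cons x u' ih =>
    intro j h1 hdrop
    have hjlt : j < (t0 :: tl).length := by
      by_contra hge
      rw [List.drop_eq_nil_of_le (by omega)] at hdrop
      simp at hdrop
    have hcons := List.drop_eq_getElem_cons (l := t0 :: tl) hjlt
    rw [hcons] at hdrop
    have hx : (t0 :: tl)[j] = x := (List.cons.injEq _ _ _ _ ▸ hdrop).1
    have hdrop' : (t0 :: tl).drop (j + 1) = u' := (List.cons.injEq _ _ _ _ ▸ hdrop).2
    have htakes : (t0 :: tl).take (j + 1) = (t0 :: tl).take j ++ [x] := by
      rw [List.take_succ_eq_append_getElem hjlt, hx]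
    have hlgstep : pvLg t0 ((t0 :: tl).take (j + 1)) =
        if t0 ≤ x then x else pvLg t0 ((t0 :: tl).take j) := by
      unfold pvLg
      rw [htakes, List.foldl_append]
      simp only [List.foldl_cons, List.foldl_nil]
    have hrmstep : pvRm t0 ((t0 :: tl).take (j + 1)) =
        if pvRm t0 ((t0 :: tl).take j) < x then x else pvRm t0 ((t0 :: tl).take j) := by
      unfold pvRm
      rw [htakes, List.foldl_append]
      simp only [List.foldl_cons, List.foldl_nil]
    rw [PySem.List.enumerate_cons]
    simp only [pvLoopA, pvLoopB]
    have hk : (if t0 ≤ x then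
          (PySem.List.index? (PySem.List.sorted (t0 :: tl) (fun x => x) true) x).getD 0
        else (PySem.List.index? (PySem.List.sorted (t0 :: tl) (fun x => x) true)
          (pvLg t0 ((t0 :: tl).take j))).getD 0) =
        (PySem.List.index? (PySem.List.sorted (t0 :: tl) (fun x => x) true)
          (pvLg t0 ((t0 :: tl).take (j + 1)))).getD 0 := by
      rw [hlgstep]
      by_cases h : t0 ≤ x <;> simp [h]
    have htg : (if t0 ≤ x then
          (pvBuildLe (PySem.List.sorted (t0 :: tl) (fun x => x) false)).getD x 0
        else (pvBuildLe (PySem.List.sorted (t0 :: tl) (fun x => x) false)).getD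
          (pvLg t0 ((t0 :: tl).take j)) 0) =
        (pvBuildLe (PySem.List.sorted (t0 :: tl) (fun x => x) false)).getD
          (pvLg t0 ((t0 :: tl).take (j + 1))) 0 := by
      rw [hlgstep]
      by_cases h : t0 ≤ x <;> simp [h]
    rw [hk, htg]
    simp only [← hrmstep]
    rw [pvCond_eq t0 tl j hjlt]
    have ih' := ih (j + 1) (by omega) hdrop'
    rw [Nat.cast_add_one] at ih'
    by_cases hc : ((((j : Int) + 1 ==
        (pvBuildLe (PySem.List.sorted (t0 :: tl) (fun x => x) false)).getD
          (pvLg t0 ((t0 :: tl).take (j + 1))) 0) &&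
        (match (PySem.List.pyGet? (pvSuffMins (t0 :: tl)) ((j : Int) + 1)).getD none with
         | none => true
         | some m => decide (pvRm t0 ((t0 :: tl).take (j + 1)) ≤ m))) = true)
    · rw [if_pos hc, if_pos hc]
    · rw [if_neg hc, if_neg hc]
      exact ih'

-- ===== VERDICT (by name: the statement is the Claim_ definition above) =====
theorem solution_spec : Claim_equal_solution := by
  unfold Claim_equal_solution
  intro t_lst _ hpre
  unfold Spec_solution
  rcases t_lst with _ | ⟨t0, tl⟩
  · exact absurd rfl hpre
  · unfold solution solution_alt
    have hget : PySem.List.pyGet? (t0 :: tl) 0 = some t0 := by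
      simp [pysem]
    rw [hget, PySem.List.enumerate_cons]
    simp only [pvLoopA, pvLoopB]
    rw [if_pos (le_refl t0), if_pos (le_refl t0)]
    have h1 : (t0 :: tl).take 1 = [t0] := rfl
    have hlg1 : pvLg t0 [t0] = t0 := by simp [pvLg]
    have hrm1 : pvRm t0 [t0] = t0 := by simp [pvRm]
    have hloop := pvLoop_eq t0 tl tl 1 (le_refl 1) (by simp)
    rw [h1, hlg1, hrm1, Nat.cast_one] at hloop
    have hcond := pvCond_eq t0 tl 0 (by simp)
    rw [Nat.cast_zero] at hcond
    rw [show (0 : Nat) + 1 = 1 from rfl, h1, hlg1, hrm1] at hcond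
    simp only [zero_add] at hcond ⊢
    rw [hcond]
    by_cases hc : (((0 : Int) + 1 ==
        (pvBuildLe (PySem.List.sorted (t0 :: tl) (fun x => x) false)).getD t0 0) &&
        (match (PySem.List.pyGet? (pvSuffMins (t0 :: tl)) ((0 : Int) + 1)).getD none with
         | none => true
         | some m => decide (t0 ≤ m))) = true
    · simp only [zero_add] at hc
      rw [if_pos hc, if_pos hc]
    · simp only [zero_add] at hc
      rw [if_neg hc, if_neg hc]
      exact hloop
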